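-- pv_equiv track=rewrite | github.com/deepthisri2185/password-generator | simplepasswordgenerator.py | has_no_long_repeats
-- ===== SOURCE A (Python) =====
-- def has_no_long_repeats(pw: str, max_run: int = 2) -> bool:
--     # Disallow runs like aaa (max_run=2) or 1111 (max_run=3), etc.
--     if not pw:
--         return True
--     run = 1
--     for i in range(1, len(pw)):
--         if pw[i] == pw[i - 1]:
--             run += 1
--             if run > max_run:
--                 return False
--         else:
--             run = 1
--     return True
-- ===== SOURCE B (Python) =====
-- def has_no_long_repeats(pw: str, max_run: int = 2) -> bool:
--     # Two-phase: collect the lengths of the maximal runs of equal consecutive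
--     # characters, then check that every run is short enough.
--     if not pw:
--         return True
--     lengths = []
--     prev, count = pw[0], 1
--     for ch in pw[1:]:
--         if ch == prev:
--             count += 1
--         else:
--             lengths.append(count)
--             prev, count = ch, 1
--     lengths.append(count)
--     return all(L <= max_run for L in lengths)
-- ===== Notes on version B (the rewrite author's own statement) =====
-- stated objective: alternative
-- what changed: A is a single pass with a running counter and an early return; B first materialises the list of maximal run lengths and then checks that each is at most max_run. Pre_ excludes non-positive max_run, a degenerate limit nobody would specify: there A still accepts strings with no adjacent repeated characters while B rejects every nonempty string, and either reading of such a limit is defensible.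
-- outside the precondition, e.g. on has_no_long_repeats('ab', 0): A returns True, B returns False; on has_no_long_repeats('a', -3): A returns True, B returns False
import Mathlib
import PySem

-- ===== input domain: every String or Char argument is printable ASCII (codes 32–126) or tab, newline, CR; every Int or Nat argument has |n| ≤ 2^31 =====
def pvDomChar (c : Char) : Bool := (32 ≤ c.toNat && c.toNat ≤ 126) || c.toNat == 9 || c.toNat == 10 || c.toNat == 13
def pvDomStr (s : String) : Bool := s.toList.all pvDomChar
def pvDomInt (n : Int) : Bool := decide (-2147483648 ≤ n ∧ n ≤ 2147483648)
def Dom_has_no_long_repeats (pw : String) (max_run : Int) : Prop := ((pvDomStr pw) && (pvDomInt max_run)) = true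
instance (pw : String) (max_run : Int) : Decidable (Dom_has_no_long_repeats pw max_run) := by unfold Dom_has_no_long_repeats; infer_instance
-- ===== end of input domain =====

-- B replaces A's single-pass counter with a two-phase run-lengths-then-check decomposition (alternative, same cost); equivalence proved for max_run >= 1.


-- ===== PORT A =====
-- the for-loop over range(1, len(pw)) with state `run`; early `return False` ends the recursion
def aGo (cs : List Char) (maxRun : Int) : List Int → Int → Bool
  | [], _ => true
  | i :: rest, run =>
    match PySem.List.pyGet? cs i, PySem.List.pyGet? cs (i - 1) with
    | some a, some b =>
      if a = b then
        if run + 1 > maxRun then false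
        else aGo cs maxRun rest (run + 1)
      else aGo cs maxRun rest 1
    | _, _ => true  -- unreachable: every index of range(1, len) is in range

def has_no_long_repeats (pw : String) (max_run : Int) : Bool :=
  let cs := pw.toList
  if cs = [] then true
  else aGo cs max_run (PySem.List.pyRange 1 (cs.length : Int) 1) 1

-- ===== PORT B =====
-- loop body of B's run-length pass: state = (lengths, prev, count)
def bStep (st : List Int × Char × Int) (ch : Char) : List Int × Char × Int :=
  if ch = st.2.1 then (st.1, st.2.1, st.2.2 + 1) else (st.1 ++ [st.2.2], ch, 1)

def has_no_long_repeats_alt (pw : String) (max_run : Int) : Bool :=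
  match pw.toList with
  | [] => true
  | c :: rest =>
    let st := rest.foldl bStep ([], c, 1)
    (st.1 ++ [st.2.2]).all (fun L => decide (L ≤ max_run))

-- ===== PRECONDITION & SPEC =====
-- Pre_ excludes non-positive max_run, a degenerate limit nobody would specify: there A
-- still accepts strings with no adjacent repeated characters while B rejects every
-- nonempty string, and either reading of such a limit is defensible.
def Pre_has_no_long_repeats (pw : String) (max_run : Int) : Prop := 1 ≤ max_run
instance (pw : String) (max_run : Int) : Decidable (Pre_has_no_long_repeats pw max_run) := by unfold Pre_has_no_long_repeats; infer_instance
def pvWitness_has_no_long_repeats : String × Int := ("aab", 2)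

def Spec_has_no_long_repeats (pw : String) (max_run : Int) (out : Bool) : Prop := out = has_no_long_repeats_alt pw max_run
instance (pw : String) (max_run : Int) (out : Bool) : Decidable (Spec_has_no_long_repeats pw max_run out) := by unfold Spec_has_no_long_repeats; infer_instance

-- ===== CLAIM (what is proved, stated in full; the proofs are below) =====
def Claim_equal_has_no_long_repeats : Prop := ∀ (pw : String) (max_run : Int), Dom_has_no_long_repeats pw max_run → Pre_has_no_long_repeats pw max_run → Spec_has_no_long_repeats pw max_run (has_no_long_repeats pw max_run)

-- ===== LEMMAS AND PROOFS =====

-- proof-side reformulation of B's run-length pass as a structural recursion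
def rlGo (c : Char) (n : Int) : List Char → List Int
  | [] => [n]
  | d :: rest => if d = c then rlGo c (n + 1) rest else n :: rlGo d 1 rest

-- proof-side reformulation of A's loop carrying the previous character
def pairGo (maxRun : Int) : Char → List Char → Int → Bool
  | _, [], _ => true
  | prev, d :: rest, run =>
    if d = prev then
      if run + 1 > maxRun then false
      else pairGo maxRun d rest (run + 1)
    else pairGo maxRun d rest 1

lemma foldl_bStep_eq_rlGo (rest : List Char) : ∀ (acc : List Int) (c : Char) (n : Int),
    (rest.foldl bStep (acc, c, n)).1 ++ [(rest.foldl bStep (acc, c, n)).2.2] = acc ++ rlGo c n rest := by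
  induction rest with
  | nil => intro acc c n; simp [rlGo]
  | cons d rest ih =>
    intro acc c n
    by_cases h : d = c
    · simp [List.foldl, bStep, rlGo, h, ih]
    · simp [List.foldl, bStep, rlGo, h, ih]

lemma rlGo_head (rest : List Char) : ∀ (c : Char) (n : Int),
    ∃ h t, rlGo c n rest = h :: t ∧ n ≤ h := by
  induction rest with
  | nil => intro c n; exact ⟨n, [], rfl, le_refl n⟩
  | cons d rest ih =>
    intro c n
    by_cases hd : d = c
    · obtain ⟨h, t, heq, hle⟩ := ih c (n + 1)
      exact ⟨h, t, by simp [rlGo, hd, heq], by omega⟩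
    · exact ⟨n, rlGo d 1 rest, by simp [rlGo, hd], le_refl n⟩

lemma pairGo_eq_all (rest : List Char) : ∀ (c : Char) (run m : Int),
    1 ≤ run → run ≤ m →
    pairGo m c rest run = (rlGo c run rest).all (fun L => decide (L ≤ m)) := by
  induction rest with
  | nil =>
    intro c run m h1 h2
    simp only [pairGo, rlGo, List.all_cons, List.all_nil, Bool.and_true]
    simp [h2]
  | cons d rest ih =>
    intro c run m h1 h2
    by_cases hd : d = c
    · subst hd
      simp only [pairGo, rlGo, if_true]
      by_cases hm : run + 1 > m
      · rw [if_pos hm]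
        obtain ⟨h, t, heq, hle⟩ := rlGo_head rest d (run + 1)
        rw [heq]
        have hcond : (decide (h ≤ m)) = false := by simp; omega
        simp only [List.all_cons, hcond, Bool.false_and]
      · rw [if_neg hm, ih d (run + 1) m (by omega) (by omega)]
    · simp only [pairGo, rlGo, if_neg hd, List.all_cons]
      rw [ih d 1 m (by omega) (by omega)]
      simp [h2]

lemma aGo_eq_pairGo (fuel : Nat) : ∀ (cs : List Char) (m : Int) (k : Nat) (run : Int),
    cs.length ≤ k + fuel → 1 ≤ k →
    aGo cs m (PySem.List.pyRange (k : Int) (cs.length : Int) 1) run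
      = pairGo m (cs.getD (k - 1) 'a') (cs.drop k) run := by
  induction fuel with
  | zero =>
    intro cs m k run hfuel hk
    rw [PySem.List.pyRange_one_eq_nil (by exact_mod_cast Nat.le_of_lt_succ (Nat.lt_succ_of_le (by omega)))]
    rw [List.drop_of_length_le (by omega)]
    simp [aGo, pairGo]
  | succ fuel ih =>
    intro cs m k run hfuel hk
    by_cases hlt : k < cs.length
    · rw [PySem.List.pyRange_one_cons (by exact_mod_cast hlt)]
      have hk1 : k - 1 < cs.length := by omega
      have hprev : PySem.List.pyGet? cs ((k : Int) - 1) = some cs[k - 1] := by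
        have : (k : Int) - 1 = ((k - 1 : Nat) : Int) := by omega
        rw [this, PySem.List.pyGet?_natCast]
        simp [hk1]
      have hcur : PySem.List.pyGet? cs (k : Int) = some cs[k] := by
        rw [PySem.List.pyGet?_natCast]; simp [hlt]
      have hdrop : cs.drop k = cs[k] :: cs.drop (k + 1) := by
        rw [List.drop_eq_getElem_cons hlt]
      have hgetD : cs.getD (k - 1) 'a' = cs[k - 1] := List.getD_eq_getElem cs 'a' hk1
      have hcast : (k : Int) + 1 = ((k + 1 : Nat) : Int) := by push_cast; ring
      have hgetD' : cs.getD ((k + 1) - 1) 'a' = cs[k] := List.getD_eq_getElem cs 'a' hlt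
      simp only [aGo, hcur, hprev, hdrop, pairGo, hgetD]
      by_cases heq : cs[k] = cs[k - 1]
      · simp only [if_pos heq]
        by_cases hm : run + 1 > m
        · simp only [if_pos hm]
        · simp only [if_neg hm]
          rw [hcast, ih cs m (k + 1) (run + 1) (by omega) (by omega), hgetD']
      · simp only [if_neg heq]
        rw [hcast, ih cs m (k + 1) 1 (by omega) (by omega), hgetD']
    · rw [PySem.List.pyRange_one_eq_nil (by exact_mod_cast Nat.le_of_not_lt hlt)]
      rw [List.drop_of_length_le (by omega)]
      simp [aGo, pairGo]

-- ===== VERDICT (by name: the statement is the Claim_ definition above) =====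
theorem has_no_long_repeats_spec : Claim_equal_has_no_long_repeats := by
  intro pw max_run _ hpre
  unfold Spec_has_no_long_repeats has_no_long_repeats has_no_long_repeats_alt
  cases hcs : pw.toList with
  | nil => simp
  | cons c rest =>
    simp only [reduceCtorEq, if_false]
    have hb := aGo_eq_pairGo (c :: rest).length (c :: rest) max_run 1 1 (by omega) (le_refl 1)
    simp only [Nat.cast_one] at hb
    rw [hb]
    simp only [Nat.sub_self, List.getD_cons_zero, List.drop_one, List.tail_cons]
    rw [pairGo_eq_all rest c 1 max_run (le_refl 1) hpre]
    show _ = ((rest.foldl bStep ([], c, 1)).1 ++ [(rest.foldl bStep ([], c, 1)).2.2]).all _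
    rw [foldl_bStep_eq_rlGo rest [] c 1]
    simp
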